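-- pv_equiv track=rewrite | github.com/StopStone42/pyLevelUp | StrPrac01/main.py | solution
-- ===== SOURCE A (Python) =====
-- def solution(s):
--     answer = ''
--
--     s = s.split(" ")
--
--     for i in range(len(s)):
--         if i != 0:
--             answer+=" "
--         for j in range(len(s[i])):
--             if j % 2 == 0:
--                 answer += s[i][j].replace(s[i][j], s[i][j].upper())
--             else:
--                 answer += s[i][j].replace(s[i][j], s[i][j].lower())
--     return answer
-- ===== SOURCE B (Python) =====
-- def solution(s):
--     out = []
--     k = 0
--     for ch in s:
--         if ch == ' ':
--             out.append(' ')
--             k = 0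
--         else:
--             out.append(ch.upper() if k % 2 == 0 else ch.lower())
--             k += 1
--     return ''.join(out)
-- ===== Notes on version B (the rewrite author's own statement) =====
-- stated objective: simpler
-- what changed: Replaces split plus a nested index-loop over each word with a single flat pass over the characters, keeping a counter that resets at word boundaries.
import Mathlib
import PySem

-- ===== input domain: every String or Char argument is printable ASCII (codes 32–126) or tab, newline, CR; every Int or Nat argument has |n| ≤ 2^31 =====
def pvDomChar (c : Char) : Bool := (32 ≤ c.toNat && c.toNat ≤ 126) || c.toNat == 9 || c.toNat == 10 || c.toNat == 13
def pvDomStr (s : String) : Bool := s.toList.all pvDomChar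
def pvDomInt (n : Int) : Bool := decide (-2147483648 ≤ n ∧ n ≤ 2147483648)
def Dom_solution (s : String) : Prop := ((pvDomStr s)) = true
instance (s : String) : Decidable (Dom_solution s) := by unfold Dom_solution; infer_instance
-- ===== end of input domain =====

-- B changes the decomposition only: one flat pass with a counter resetting at spaces, instead of split(" ") plus nested index loops; same cost.

-- ===== PORT A =====
-- one step of A's inner loop: answer += s[i][j].replace(s[i][j], s[i][j].upper()/lower())
def pvCaseA (acc : List Char) (jc : Int × Char) : List Char :=
  if PySem.Int.mod jc.1 2 == 0 then
    acc ++ PySem.Chars.replace [jc.2] [jc.2] (PySem.Chars.upper [jc.2])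
  else
    acc ++ PySem.Chars.replace [jc.2] [jc.2] (PySem.Chars.lower [jc.2])

-- one step of A's outer loop (word s[i] at index i); the index loops 'for i in range(len(s))'
-- reading s[i] / 'for j in range(len(s[i]))' reading s[i][j] are folds over the indexed elements
def pvStepA (acc : List Char) (iw : Int × List Char) : List Char :=
  let acc := if iw.1 != 0 then acc ++ [' '] else acc
  (PySem.List.enumerate iw.2).foldl pvCaseA acc

def solution (s : String) : String :=
  -- s = s.split(" ") is PySem.Chars.splitOn · [' ']
  String.ofList ((PySem.List.enumerate (PySem.Chars.splitOn s.toList [' '])).foldl pvStepA [])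

-- ===== PORT B =====
def altGo : List Char → Nat → List Char
  | [], _ => []
  | c :: rest, k =>
    if c == ' ' then ' ' :: altGo rest 0
    else (if k % 2 == 0 then PySem.Chars.upperChar c else PySem.Chars.lowerChar c) :: altGo rest (k + 1)

def solution_alt (s : String) : String := String.ofList (altGo s.toList 0)

-- ===== PRECONDITION & SPEC =====
def Spec_solution (s : String) (out : String) : Prop := out = solution_alt s
instance (s : String) (out : String) : Decidable (Spec_solution s out) := by unfold Spec_solution; infer_instance

-- ===== CLAIM (what is proved, stated in full; the proofs are below) =====
def Claim_equal_solution : Prop := ∀ (s : String), Dom_solution s → Spec_solution s (solution s)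

-- ===== LEMMAS AND PROOFS =====

-- structural single-space split, used only by the proofs
def mySplit : List Char → List (List Char)
  | [] => [[]]
  | c :: rest =>
    if c = ' ' then [] :: mySplit rest
    else (c :: (mySplit rest).headI) :: (mySplit rest).tail

theorem mySplit_ne_nil (l : List Char) : mySplit l ≠ [] := by
  cases l with
  | nil => simp [mySplit]
  | cons c rest => simp only [mySplit]; split <;> simp

theorem replace_single (c : Char) (n : List Char) : PySem.Chars.replace [c] [c] n = n := by
  simp [PySem.Chars.replace, PySem.Chars.replace.go, List.isPrefixOf]

theorem go_eq_mySplit (l : List Char) : ∀ (fuel : Nat) (cur : List Char) (acc : List (List Char)),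
    l.length < fuel →
    PySem.Chars.splitOn.go [' '] fuel l cur acc =
      acc.reverse ++ (cur.reverse ++ (mySplit l).headI) :: (mySplit l).tail := by
  induction l with
  | nil =>
    intro fuel cur acc h
    cases fuel with
    | zero => omega
    | succ f =>
      rw [PySem.Chars.splitOn.go.eq_def]
      simp [mySplit]
  | cons c rest ih =>
    intro fuel cur acc h
    cases fuel with
    | zero => simp at h
    | succ f =>
      rw [PySem.Chars.splitOn.go.eq_def]
      by_cases hc : c = ' '
      · subst hc
        simp only [List.isPrefixOf, beq_self_eq_true, Bool.true_and,
          if_true, List.length_singleton, List.drop_succ_cons, List.drop_zero]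
        rw [ih f [] (cur.reverse :: acc) (by simpa using Nat.lt_of_succ_lt_succ h)]
        have hne := mySplit_ne_nil rest
        cases hms : mySplit rest with
        | nil => exact absurd hms hne
        | cons w ws => simp [mySplit, hms]
      · have hpre : List.isPrefixOf [' '] (c :: rest) = false := by
          simp [List.isPrefixOf, Ne.symm hc]
        simp only [hpre, Bool.false_eq_true, if_false]
        rw [ih f (c :: cur) acc (by simpa using Nat.lt_of_succ_lt_succ h)]
        simp [mySplit, hc]

theorem splitOn_eq_mySplit (cs : List Char) :
    PySem.Chars.splitOn cs [' '] = mySplit cs := by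
  have h := go_eq_mySplit cs (cs.length + 1) [] [] (by omega)
  have hne := mySplit_ne_nil cs
  rw [PySem.Chars.splitOn, h]
  cases hms : mySplit cs with
  | nil => exact absurd hms hne
  | cons w ws => simp

-- one word under B's casing rule, starting at counter k (proof-only)
def caseMap : List Char → Nat → List Char
  | [], _ => []
  | c :: rest, k =>
    (if k % 2 == 0 then PySem.Chars.upperChar c else PySem.Chars.lowerChar c) :: caseMap rest (k + 1)

theorem inner_fold_eq (w : List Char) : ∀ (k : Nat) (acc : List Char),
    (PySem.List.enumerate w (k : Int)).foldl pvCaseA acc = acc ++ caseMap w k := by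
  induction w with
  | nil => intro k acc; simp [PySem.List.enumerate, caseMap]
  | cons c rest ih =>
    intro k acc
    simp only [PySem.List.enumerate, List.foldl_cons, caseMap]
    have hk : ((k : Int) + 1) = ((k + 1 : Nat) : Int) := by push_cast; ring
    rw [hk, ih (k + 1)]
    have hdvd : ((2:Int) ∣ (k:Int)) ↔ k % 2 = 0 := by omega
    by_cases h2 : k % 2 = 0
    · simp [pvCaseA, hdvd, h2, replace_single, PySem.Chars.upper]
    · simp [pvCaseA, hdvd, h2, replace_single, PySem.Chars.lower]

theorem inner_fold_eq0 (w : List Char) (acc : List Char) :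
    (PySem.List.enumerate w).foldl pvCaseA acc = acc ++ caseMap w 0 :=
  inner_fold_eq w 0 acc

-- the tail words, each preceded by the ' ' that the 'i != 0' branch appends
theorem outer_fold_eq (ws : List (List Char)) : ∀ (i : Int) (acc : List Char), 1 ≤ i →
    (PySem.List.enumerate ws i).foldl pvStepA acc
      = acc ++ (ws.map (fun w => ' ' :: caseMap w 0)).flatten := by
  induction ws with
  | nil => intro i acc _; simp [PySem.List.enumerate]
  | cons w ws ih =>
    intro i acc hi
    have hne : (i != 0) = true := by simp; omega
    simp only [PySem.List.enumerate, List.foldl_cons]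
    rw [show pvStepA acc (i, w) = acc ++ ' ' :: caseMap w 0 by
          simp only [pvStepA, hne, if_true]; rw [inner_fold_eq0]; simp,
        ih (i + 1) _ (by omega)]
    simp

theorem altGo_eq (cs : List Char) : ∀ (k : Nat),
    altGo cs k = caseMap (mySplit cs).headI k ++
      ((mySplit cs).tail.map (fun w => ' ' :: caseMap w 0)).flatten := by
  induction cs with
  | nil => intro k; simp [altGo, mySplit, caseMap]
  | cons c rest ih =>
    intro k
    have hne := mySplit_ne_nil rest
    by_cases hc : c = ' '
    · subst hc
      simp only [altGo, beq_self_eq_true, if_true, mySplit, List.headI, List.tail,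
        caseMap, List.nil_append]
      rw [ih 0]
      cases hms : mySplit rest with
      | nil => exact absurd hms hne
      | cons v vs => simp
    · simp only [altGo, beq_iff_eq, hc, if_false, mySplit]
      rw [ih (k + 1)]
      cases hms : mySplit rest with
      | nil => exact absurd hms hne
      | cons v vs => simp [caseMap]

theorem lists_eq (cs : List Char) :
    (PySem.List.enumerate (PySem.Chars.splitOn cs [' '])).foldl pvStepA [] = altGo cs 0 := by
  rw [splitOn_eq_mySplit, altGo_eq cs 0]
  have hne := mySplit_ne_nil cs
  cases hms : mySplit cs with
  | nil => exact absurd hms hne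
  | cons w ws =>
    simp only [PySem.List.enumerate, List.foldl_cons, List.headI, List.tail]
    rw [show pvStepA [] (0, w) = caseMap w 0 by
          simp only [pvStepA, bne_self_eq_false]; rw [inner_fold_eq0]; simp,
        show (0:Int) + 1 = 1 from rfl, outer_fold_eq ws 1 _ (by omega)]

-- ===== VERDICT (by name: the statement is the Claim_ definition above) =====
theorem solution_spec : Claim_equal_solution := by
  intro s _
  unfold Spec_solution solution solution_alt
  rw [lists_eq]
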